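-- pv_equiv track=rewrite | github.com/soupedroalmeida/projecteuler | 0019_countingsundays/0019_countingsundays.py | get_FirtDays
-- ===== SOURCE A (Python) =====
-- def get_FirtDays(y):
--     days = [31, 28, 31, 30, 31, 30, 31, 31, 30, 31, 30, 31]
--     leap = False
--     if y % 400 == 0 or (y % 4 == 0 and y % 100 != 0): leap = True
--     if leap: days[1] = 29
--     first_absdays = [1]
--     for daycount in days:
--         first_absdays.append(first_absdays[-1] + daycount)
--     first_absdays.pop()
--     return first_absdays
-- ===== SOURCE B (Python) =====
-- def get_FirtDays(y):
--     leap = y % 400 == 0 or (y % 4 == 0 and y % 100 != 0)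
--     days = [31, 29 if leap else 28, 31, 30, 31, 30, 31, 31, 30, 31, 30, 31]
--     return [1 + sum(days[:i]) for i in range(12)]
-- ===== Notes on version B (the rewrite author's own statement) =====
-- stated objective: alternative
-- what changed: Replaced the running-total accumulation with append/[-1]/pop by independent per-month prefix sums: each month's first-day offset is computed by re-summing the sliced list of preceding month lengths.
import Mathlib
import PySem

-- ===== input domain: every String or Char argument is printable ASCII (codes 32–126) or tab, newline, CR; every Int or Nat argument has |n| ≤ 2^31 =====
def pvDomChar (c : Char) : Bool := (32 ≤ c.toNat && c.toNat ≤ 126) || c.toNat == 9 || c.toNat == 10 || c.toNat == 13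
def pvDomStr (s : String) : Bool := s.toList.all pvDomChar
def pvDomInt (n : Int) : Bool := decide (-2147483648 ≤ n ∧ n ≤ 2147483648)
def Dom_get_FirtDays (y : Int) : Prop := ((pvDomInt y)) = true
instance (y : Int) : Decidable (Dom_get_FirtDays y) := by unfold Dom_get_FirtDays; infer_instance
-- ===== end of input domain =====

-- B computes each month's first-day offset as 1 + sum of the preceding month lengths
-- (repeated prefix scans) instead of A's running-total append/[-1]/pop pass; alternative decomposition, not faster.

-- ===== PORT A =====
def get_FirtDays (y : Int) : List Int :=
  let days : List Int := [31, 28, 31, 30, 31, 30, 31, 31, 30, 31, 30, 31]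
  let leap : Bool :=
    (PySem.Int.mod y 400 == 0) || (PySem.Int.mod y 4 == 0 && !(PySem.Int.mod y 100 == 0))
  let days := if leap then days.set 1 29 else days   -- days[1] = 29
  -- for daycount in days: first_absdays.append(first_absdays[-1] + daycount)
  let first_absdays :=
    days.foldl (fun acc d => acc ++ [((PySem.List.pyGet? acc (-1)).getD 0) + d]) [(1 : Int)]
  first_absdays.dropLast   -- .pop() discards the last element

-- ===== PORT B =====
def get_FirtDays_alt (y : Int) : List Int :=
  let leap : Bool :=
    (PySem.Int.mod y 400 == 0) || (PySem.Int.mod y 4 == 0 && !(PySem.Int.mod y 100 == 0))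
  let days : List Int := [31, if leap then 29 else 28, 31, 30, 31, 30, 31, 31, 30, 31, 30, 31]
  -- days[:i] with 0 <= i: slice from the front, exact as List.take
  (List.range 12).map (fun i => 1 + (days.take i).sum)

-- ===== PRECONDITION & SPEC =====
def Spec_get_FirtDays (y : Int) (out : List Int) : Prop := out = get_FirtDays_alt y
instance (y : Int) (out : List Int) : Decidable (Spec_get_FirtDays y out) := by unfold Spec_get_FirtDays; infer_instance

-- ===== CLAIM (what is proved, stated in full; the proofs are below) =====
def Claim_equal_get_FirtDays : Prop := ∀ (y : Int), Dom_get_FirtDays y → Spec_get_FirtDays y (get_FirtDays y)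

-- ===== LEMMAS AND PROOFS =====
theorem pv_leap_case (y : Int)
    (h : ((PySem.Int.mod y 400 == 0) || (PySem.Int.mod y 4 == 0 && !(PySem.Int.mod y 100 == 0))) = true) :
    get_FirtDays y = get_FirtDays_alt y := by
  unfold get_FirtDays get_FirtDays_alt
  simp only [h]
  decide

theorem pv_common_case (y : Int)
    (h : ((PySem.Int.mod y 400 == 0) || (PySem.Int.mod y 4 == 0 && !(PySem.Int.mod y 100 == 0))) = false) :
    get_FirtDays y = get_FirtDays_alt y := by
  unfold get_FirtDays get_FirtDays_alt
  simp only [h]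
  decide

-- ===== VERDICT (by name: the statement is the Claim_ definition above) =====
theorem get_FirtDays_spec : Claim_equal_get_FirtDays := by
  intro y _
  unfold Spec_get_FirtDays
  cases h : ((PySem.Int.mod y 400 == 0) || (PySem.Int.mod y 4 == 0 && !(PySem.Int.mod y 100 == 0)))
  · exact pv_common_case y h
  · exact pv_leap_case y h
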